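-- pv_equiv track=rewrite | github.com/appaddbiz/dr-madhuri-ms | deduplicate_sitemap.py | format_services
-- ===== SOURCE A (Python) =====
-- def format_services(services):
--     # services is list of dicts {title, link}
--     # We want to deduplicate here.
--     # Logic: Keep the LAST occurrence if link matches?
--     # Or strict dedupe?
--     # User had duplicates (old vs new). The new ones (longer titles) are usually at the end.
--     # So we traverse in reverse to keep unique links/titles, then reverse back.
--
--     unique_svcs = []
--     seen = set()
--
--     # Process in reverse order to keep the LATEST/LAST entry
--     for svc in reversed(services):
--         # normalize link
--         link = svc['link'].strip()
--         # normalize title (ignore case?)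
--         title = svc['title'].strip()
--
--         # Unique key: just link? Or title?
--         # In Jayanagar 7th block:
--         # Link: .../best-maternity-clinic-in-jayanagar-7th-block
--         # Title 1: Best maternity clinic...
--         # Title 2: Exceptional Mother Care...
--         # We want to keep Title 2 (Newer/Better). Which is later in the list.
--         # So iterating reverse and checking link uniqueness works.
--
--         if link not in seen:
--             unique_svcs.append(svc)
--             seen.add(link)
--
--     return list(reversed(unique_svcs))
-- ===== SOURCE B (Python) =====
-- def format_services(services):
--     # Two staged passes instead of reverse/seen-set/reverse:
--     # pass 1 records the index of the LAST occurrence of each stripped link,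
--     # pass 2 keeps exactly the items sitting at their link's last index.
--     last = {}
--     for i, svc in enumerate(services):
--         link = svc['link'].strip()
--         title = svc['title'].strip()  # read as the original does
--         last[link] = i
--     return [svc for i, svc in enumerate(services) if last[svc['link'].strip()] == i]
-- ===== Notes on version B (the rewrite author's own statement) =====
-- stated objective: alternative
-- what changed: Replaces the reverse-traverse/seen-set/reverse-back scheme with two staged forward passes: a dict mapping each stripped link to its last index, then a filter keeping the items that sit at their link's last index.
import Mathlib
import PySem

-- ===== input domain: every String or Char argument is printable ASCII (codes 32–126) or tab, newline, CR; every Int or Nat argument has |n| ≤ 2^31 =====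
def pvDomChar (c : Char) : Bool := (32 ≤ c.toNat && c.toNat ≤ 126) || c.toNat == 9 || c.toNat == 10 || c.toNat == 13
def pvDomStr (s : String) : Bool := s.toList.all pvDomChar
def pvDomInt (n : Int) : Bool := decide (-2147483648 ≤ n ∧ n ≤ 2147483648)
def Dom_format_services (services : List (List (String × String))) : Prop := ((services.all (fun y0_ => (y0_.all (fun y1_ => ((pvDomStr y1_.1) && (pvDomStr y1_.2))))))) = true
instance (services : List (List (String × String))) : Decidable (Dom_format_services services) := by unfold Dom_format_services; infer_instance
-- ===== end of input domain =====

-- B replaces A's reverse traversal + seen-set + second reversal with two staged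
-- forward passes: a dict from stripped link to its LAST index, then a filter
-- keeping exactly the items that sit at their link's last index.

-- ===== PORT A =====
-- svc['link'].strip() / svc['title'].strip(); Pre_ guarantees the keys exist (getD "" is never reached inside Pre_)
def pvLinkOf (svc : List (String × String)) : String :=
  PySem.Str.strip (((PySem.Dict.mk svc).get? "link").getD "")

def pvTitleOf (svc : List (String × String)) : String :=
  PySem.Str.strip (((PySem.Dict.mk svc).get? "title").getD "")

-- the 'for svc in reversed(services)' loop of A, state = (unique_svcs, seen)
def pvLoopA : List (List (String × String)) → List (List (String × String)) → PySem.Set String → List (List (String × String))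
  | [], unique_svcs, _seen => unique_svcs
  | svc :: rest, unique_svcs, seen =>
    let link := pvLinkOf svc
    let _title := pvTitleOf svc
    if PySem.Set.contains seen link = false then
      pvLoopA rest (unique_svcs ++ [svc]) (PySem.Set.add seen link)
    else
      pvLoopA rest unique_svcs seen

def format_services (services : List (List (String × String))) : List (List (String × String)) :=
  (pvLoopA services.reverse [] PySem.Set.empty).reverse

-- ===== PORT B =====
-- pass 1 of B: 'for i, svc in enumerate(services): …; last[link] = i'
def pvLastIdx (services : List (List (String × String))) : PySem.Dict String Int :=
  (PySem.List.enumerate services).foldl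
    (fun d p =>
      let _title := pvTitleOf p.2
      PySem.Dict.insert d (pvLinkOf p.2) p.1)
    PySem.Dict.empty

-- pass 2 of B: the list comprehension; last[link] always hits, so getD's default -1 is never returned
def format_services_alt (services : List (List (String × String))) : List (List (String × String)) :=
  let last := pvLastIdx services
  ((PySem.List.enumerate services).filter
      (fun p => PySem.Dict.getD last (pvLinkOf p.2) (-1) == p.1)).map (·.2)

-- ===== PRECONDITION & SPEC =====
-- Pre_ excludes exactly the inputs where the Python A raises KeyError: a service dict missing 'link' or 'title' (B raises there too).
def Pre_format_services (services : List (List (String × String))) : Prop :=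
  ∀ svc ∈ services, (PySem.Dict.mk svc).contains "link" = true ∧ (PySem.Dict.mk svc).contains "title" = true
instance (services : List (List (String × String))) : Decidable (Pre_format_services services) := by unfold Pre_format_services; infer_instance

def pvWitness_format_services : (List (List (String × String))) :=
  [[("link", " a "), ("title", "Old")], [("link", "b"), ("title", "Keep")], [("link", "a"), ("title", "New")]]

def Spec_format_services (services : List (List (String × String))) (out : List (List (String × String))) : Prop := out = format_services_alt services
instance (services : List (List (String × String))) (out : List (List (String × String))) : Decidable (Spec_format_services services out) := by unfold Spec_format_services; infer_instance

-- ===== CLAIM (what is proved, stated in full; the proofs are below) =====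
def Claim_equal_format_services : Prop := ∀ (services : List (List (String × String))), Dom_format_services services → Pre_format_services services → Spec_format_services services (format_services services)

-- ===== LEMMAS AND PROOFS =====

theorem pv_contains_add (s : PySem.Set String) (a x : String) :
    PySem.Set.contains (PySem.Set.add s a) x = (PySem.Set.contains s x || x == a) := by
  simp only [PySem.Set.add, PySem.Set.contains]
  split
  · rename_i h
    cases hx : x == a
    · simp
    · have hxa : x = a := by simpa using hx
      subst hxa
      simp
      simpa using h
  · cases hx : x == a
    · simp_all
    · have hxa : x = a := by simpa using hx
      simp [hxa]

-- accumulator lemma for A's loop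
theorem pvLoopA_acc (xs : List (List (String × String))) (acc : List (List (String × String))) (seen : PySem.Set String) :
    pvLoopA xs acc seen = acc ++ pvLoopA xs [] seen := by
  induction xs generalizing acc seen with
  | nil => simp [pvLoopA]
  | cons svc rest ih =>
    simp only [pvLoopA]
    by_cases h : PySem.Set.contains seen (pvLinkOf svc) = false
    · simp only [h, if_true]
      simp only [List.nil_append]
      rw [ih (acc ++ [svc]), ih [svc]]
      simp
    · simp only [h]
      exact ih acc seen

-- A's loop depends on seen only through membership
theorem pvLoopA_congr (xs : List (List (String × String))) (s₁ s₂ : PySem.Set String)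
    (h : ∀ x, PySem.Set.contains s₁ x = PySem.Set.contains s₂ x) :
    pvLoopA xs [] s₁ = pvLoopA xs [] s₂ := by
  induction xs generalizing s₁ s₂ with
  | nil => simp [pvLoopA]
  | cons svc rest ih =>
    simp only [pvLoopA]
    rw [h (pvLinkOf svc)]
    by_cases hc : PySem.Set.contains s₂ (pvLinkOf svc) = false
    · simp only [hc, if_true]
      simp only [List.nil_append]
      rw [pvLoopA_acc rest [svc] _, pvLoopA_acc rest [svc] _]
      congr 1
      apply ih
      intro x
      rw [pv_contains_add, pv_contains_add, h x]
    · simp only [hc]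
      exact ih _ _ h

-- keys of A's output are never in the seed set
theorem pvLoopA_keys (xs : List (List (String × String))) (seen : PySem.Set String) :
    ∀ s ∈ pvLoopA xs [] seen, PySem.Set.contains seen (pvLinkOf s) = false := by
  induction xs generalizing seen with
  | nil => simp [pvLoopA]
  | cons svc rest ih =>
    intro s hs
    simp only [pvLoopA] at hs
    by_cases hc : PySem.Set.contains seen (pvLinkOf svc) = false
    · simp only [hc, if_true] at hs
      rw [pvLoopA_acc] at hs
      rcases List.mem_append.mp hs with h1 | h1
      · simp at h1
        subst h1
        exact hc
      · have := ih _ _ h1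
        rw [pv_contains_add] at this
        simp only [Bool.or_eq_false_iff] at this
        exact this.1
    · simp only [hc] at hs
      exact ih _ _ hs

-- seeding one extra key filters it out of the result
theorem pvLoopA_add (xs : List (List (String × String))) (seen : PySem.Set String) (a : String)
    (ha : PySem.Set.contains seen a = false) :
    pvLoopA xs [] (PySem.Set.add seen a) = (pvLoopA xs [] seen).filter (fun s => !(pvLinkOf s == a)) := by
  induction xs generalizing seen with
  | nil => simp [pvLoopA]
  | cons svc rest ih =>
    simp only [pvLoopA]
    by_cases hc : PySem.Set.contains seen (pvLinkOf svc) = false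
    · cases hxa : pvLinkOf svc == a
      · have hadd : PySem.Set.contains (PySem.Set.add seen a) (pvLinkOf svc) = false := by
          rw [pv_contains_add, hc, hxa]
          rfl
        simp only [hadd, hc, if_true]
        simp only [List.nil_append]
        rw [pvLoopA_acc rest [svc] _, pvLoopA_acc rest [svc] _]
        rw [List.filter_append]
        have hsvc : List.filter (fun s => !(pvLinkOf s == a)) [svc] = [svc] := by
          simp [hxa]
        rw [hsvc]
        congr 1
        have hswap : pvLoopA rest [] (PySem.Set.add (PySem.Set.add seen a) (pvLinkOf svc))
            = pvLoopA rest [] (PySem.Set.add (PySem.Set.add seen (pvLinkOf svc)) a) := by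
          apply pvLoopA_congr
          intro x
          simp only [pv_contains_add]
          cases x == a <;> cases x == pvLinkOf svc <;> simp
        rw [hswap]
        apply ih
        rw [pv_contains_add, ha]
        have : (a == pvLinkOf svc) = false := by
          cases h2 : a == pvLinkOf svc
          · rfl
          · have : a = pvLinkOf svc := by simpa using h2
            subst this
            simp at hxa
        rw [this]
        rfl
      · have hxe : pvLinkOf svc = a := by simpa using hxa
        have hadd : PySem.Set.contains (PySem.Set.add seen a) (pvLinkOf svc) = true := by
          rw [pv_contains_add, hxa]
          simp
        rw [if_neg (by rw [hadd]; decide), if_pos hc]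
        simp only [List.nil_append]
        rw [pvLoopA_acc rest [svc] _]
        rw [List.filter_append]
        have hsvc : List.filter (fun s => !(pvLinkOf s == a)) [svc] = [] := by
          simp [hxa]
        rw [hsvc, List.nil_append, hxe]
        have hall : ∀ s ∈ pvLoopA rest [] (PySem.Set.add seen a), (!(pvLinkOf s == a)) = true := by
          intro s hs
          have := pvLoopA_keys rest _ s hs
          rw [pv_contains_add, Bool.or_eq_false_iff] at this
          simp [this.2]
        exact (List.filter_eq_self.mpr hall).symm
    · have hc2 : PySem.Set.contains seen (pvLinkOf svc) = true := by
        cases h2 : PySem.Set.contains seen (pvLinkOf svc)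
        · exact absurd h2 hc
        · rfl
      have hadd : PySem.Set.contains (PySem.Set.add seen a) (pvLinkOf svc) = true := by
        rw [pv_contains_add, hc2]
        rfl
      rw [if_neg (by rw [hadd]; decide), if_neg (by rw [hc2]; decide)]
      exact ih _ ha

-- A's snoc step
theorem stepA (l : List (List (String × String))) (x : List (String × String)) :
    format_services (l ++ [x]) = (format_services l).filter (fun s => !(pvLinkOf s == pvLinkOf x)) ++ [x] := by
  unfold format_services
  rw [List.reverse_append]
  simp only [List.reverse_cons, List.reverse_nil, List.nil_append, List.singleton_append]
  simp only [pvLoopA]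
  rw [if_pos (show (PySem.Set.contains PySem.Set.empty (pvLinkOf x)) = false from rfl)]
  simp only [List.nil_append]
  rw [pvLoopA_acc _ [x] _]
  rw [pvLoopA_add _ _ _ rfl]
  rw [List.reverse_append]
  simp [List.filter_reverse]

-- pass 1 of B on a snoc: the last-index dict gains the final element's key at index (length l)
theorem pvLastIdx_snoc (l : List (List (String × String))) (x : List (String × String)) :
    pvLastIdx (l ++ [x]) = PySem.Dict.insert (pvLastIdx l) (pvLinkOf x) (l.length : Int) := by
  unfold pvLastIdx
  rw [PySem.List.enumerate_append, List.foldl_append]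
  simp [PySem.List.enumerate]

-- map snd commutes with a filter that only looks at snd
theorem pv_map_snd_filter_snd (q : List (String × String) → Bool) (X : List (Int × List (String × String))) :
    (X.filter (fun p => q p.2)).map (·.2) = (X.map (·.2)).filter q := by
  induction X with
  | nil => rfl
  | cons p rest ih =>
    simp only [List.filter_cons, List.map_cons]
    cases hq : q p.2 <;> simp [ih]

-- B's snoc step
theorem stepB (l : List (List (String × String))) (x : List (String × String)) :
    format_services_alt (l ++ [x]) = (format_services_alt l).filter (fun s => !(pvLinkOf s == pvLinkOf x)) ++ [x] := by
  unfold format_services_alt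
  rw [pvLastIdx_snoc, PySem.List.enumerate_append]
  simp only [PySem.List.enumerate, List.filter_append, List.map_append]
  congr 1
  · -- the old prefix: new condition = old condition ∧ link ≠ link x
    have hcongr : (PySem.List.enumerate l).filter
          (fun p => PySem.Dict.getD (PySem.Dict.insert (pvLastIdx l) (pvLinkOf x) (l.length : Int)) (pvLinkOf p.2) (-1) == p.1)
        = (PySem.List.enumerate l).filter
          (fun p => !(pvLinkOf p.2 == pvLinkOf x) && (PySem.Dict.getD (pvLastIdx l) (pvLinkOf p.2) (-1) == p.1)) := by
      apply List.filter_congr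
      intro p hp
      rcases (PySem.List.mem_enumerate_iff l 0 p).mp hp with ⟨k, hk, hpk⟩
      subst hpk
      rw [PySem.Dict.getD_insert]
      by_cases he : pvLinkOf l[k] = pvLinkOf x
      · rw [if_pos he]
        simp only [he, beq_self_eq_true, Bool.not_true, Bool.false_and]
        simp only [beq_eq_false_iff_ne, ne_eq]
        omega
      · rw [if_neg he]
        simp [he]
    rw [hcongr, ← List.filter_filter]
    rw [pv_map_snd_filter_snd (fun s => !(pvLinkOf s == pvLinkOf x))]
  · -- the final element is always kept: its key's last index is its own index
    simp [PySem.Dict.getD_insert_self]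

theorem pv_main (services : List (List (String × String))) :
    format_services services = format_services_alt services := by
  induction services using List.reverseRecOn with
  | nil => rfl
  | append_singleton l x ih =>
    rw [stepA, stepB, ih]

-- ===== VERDICT (by name: the statement is the Claim_ definition above) =====
theorem format_services_spec : Claim_equal_format_services := by
  intro services _ _
  unfold Spec_format_services
  exact pv_main services
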